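-- pv_equiv track=rewrite | github.com/valentinafcruz/Programa2 | funcoes.py | guardar_dado
-- ===== SOURCE A (Python) =====
-- def guardar_dado(dados_rolados, dados_guardados, dado_p_guardar):
--     novos_dados_rolados = []
--     i = 0
--     while i < len(dados_rolados):
--         if i == dado_p_guardar:
--             dados_guardados.append(dados_rolados[i])
--         else:
--             novos_dados_rolados.append(dados_rolados[i])
--         i += 1
--     return [novos_dados_rolados, dados_guardados]
-- ===== SOURCE B (Python) =====
-- def guardar_dado(dados_rolados, dados_guardados, dado_p_guardar):
--     if 0 <= dado_p_guardar < len(dados_rolados):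
--         dados_guardados.append(dados_rolados[dado_p_guardar])
--         restante = dados_rolados[:dado_p_guardar] + dados_rolados[dado_p_guardar + 1:]
--     else:
--         restante = list(dados_rolados)
--     return [restante, dados_guardados]
-- ===== Notes on version B (the rewrite author's own statement) =====
-- stated objective: idiomatic
-- what changed: Replaced the index-by-index scanning loop with a single range test plus slice concatenation (dados_rolados[:i] + dados_rolados[i+1:]) and one append.
import Mathlib
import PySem

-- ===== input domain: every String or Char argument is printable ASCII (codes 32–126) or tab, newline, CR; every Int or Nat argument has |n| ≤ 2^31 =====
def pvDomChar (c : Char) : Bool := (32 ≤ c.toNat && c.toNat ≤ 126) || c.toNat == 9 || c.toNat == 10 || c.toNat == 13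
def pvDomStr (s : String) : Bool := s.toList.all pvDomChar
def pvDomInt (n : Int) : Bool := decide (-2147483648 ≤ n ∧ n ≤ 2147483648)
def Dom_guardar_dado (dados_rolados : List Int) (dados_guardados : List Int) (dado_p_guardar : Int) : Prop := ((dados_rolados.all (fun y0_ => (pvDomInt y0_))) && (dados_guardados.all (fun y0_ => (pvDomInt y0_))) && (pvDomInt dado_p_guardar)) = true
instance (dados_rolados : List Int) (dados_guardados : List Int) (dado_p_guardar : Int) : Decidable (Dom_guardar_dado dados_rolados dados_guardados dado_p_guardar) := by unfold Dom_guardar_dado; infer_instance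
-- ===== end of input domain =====

-- B replaces A's index-scanning while-loop with a range test + slice concatenation (idiomatic,
-- equal cost). Both A and B append to dados_guardados in place; equivalence here is about the
-- returned value.


-- ===== PORT A =====
-- the while loop over i, carrying (novos_dados_rolados, dados_guardados)
def gdLoop (k : Int) : List Int → Int → List Int → List Int → List Int × List Int
  | [], _, novos, g => (novos, g)
  | x :: xs, i, novos, g =>
      if i = k then gdLoop k xs (i + 1) novos (g ++ [x])
      else gdLoop k xs (i + 1) (novos ++ [x]) g

def guardar_dado (dados_rolados : List Int) (dados_guardados : List Int) (dado_p_guardar : Int) : List (List Int) :=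
  let p := gdLoop dado_p_guardar dados_rolados 0 [] dados_guardados
  [p.1, p.2]

-- ===== PORT B =====
def guardar_dado_alt (dados_rolados : List Int) (dados_guardados : List Int) (dado_p_guardar : Int) : List (List Int) :=
  if 0 ≤ dado_p_guardar ∧ dado_p_guardar < dados_rolados.length then
    let x := (PySem.List.pyGet? dados_rolados dado_p_guardar).getD 0   -- in range by the guard
    let restante := PySem.List.slice dados_rolados none (some dado_p_guardar)
                    ++ PySem.List.slice dados_rolados (some (dado_p_guardar + 1)) none
    [restante, dados_guardados ++ [x]]
  else
    [dados_rolados, dados_guardados]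

-- ===== PRECONDITION & SPEC =====
def Spec_guardar_dado (dados_rolados : List Int) (dados_guardados : List Int) (dado_p_guardar : Int) (out : List (List Int)) : Prop := out = guardar_dado_alt dados_rolados dados_guardados dado_p_guardar
instance (dados_rolados : List Int) (dados_guardados : List Int) (dado_p_guardar : Int) (out : List (List Int)) : Decidable (Spec_guardar_dado dados_rolados dados_guardados dado_p_guardar out) := by unfold Spec_guardar_dado; infer_instance

-- ===== CLAIM (what is proved, stated in full; the proofs are below) =====
def Claim_equal_guardar_dado : Prop := ∀ (dados_rolados : List Int) (dados_guardados : List Int) (dado_p_guardar : Int), Dom_guardar_dado dados_rolados dados_guardados dado_p_guardar → Spec_guardar_dado dados_rolados dados_guardados dado_p_guardar (guardar_dado dados_rolados dados_guardados dado_p_guardar)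

-- ===== LEMMAS AND PROOFS =====

-- shifting the loop counter to 0
theorem gdLoop_shift (k : Int) (xs : List Int) (i : Int) (novos g : List Int) :
    gdLoop k xs i novos g = gdLoop (k - i) xs 0 novos g := by
  induction xs generalizing k i novos g with
  | nil => rfl
  | cons x xs ih =>
      simp only [gdLoop]
      split_ifs with h1 h2 h2
      · rw [ih k (i + 1), ih (k - i) (0 + 1)]
        have e : k - (i + 1) = k - i - (0 + 1) := by omega
        rw [e]
      · omega
      · omega
      · rw [ih k (i + 1), ih (k - i) (0 + 1)]
        have e : k - (i + 1) = k - i - (0 + 1) := by omega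
        rw [e]

-- closed form of the loop
theorem gdLoop_spec (xs : List Int) (k : Int) (novos g : List Int) :
    gdLoop k xs 0 novos g =
      if 0 ≤ k ∧ k < xs.length then
        (novos ++ (xs.take k.toNat ++ xs.drop (k.toNat + 1)), g ++ [xs.getD k.toNat 0])
      else (novos ++ xs, g) := by
  induction xs generalizing k novos g with
  | nil => simp [gdLoop]
  | cons x xs ih =>
      simp only [gdLoop]
      by_cases hk : (0 : Int) = k
      · rw [if_pos hk, gdLoop_shift, ih]
        rw [if_neg (by omega),
            if_pos (by refine ⟨by omega, ?_⟩; simp only [List.length_cons]; push_cast; omega)]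
        have ht : k.toNat = 0 := by omega
        simp [ht]
      · rw [if_neg hk, gdLoop_shift, ih]
        have hz : k - (0 + 1) = k - 1 := by ring
        rw [hz]
        by_cases h : 0 ≤ k - 1 ∧ k - 1 < (xs.length : Int)
        · rw [if_pos h, if_pos (by refine ⟨by omega, ?_⟩; simp only [List.length_cons]; push_cast; omega)]
          have hkt : k.toNat = (k - 1).toNat + 1 := by omega
          rw [hkt]
          simp [List.take_succ_cons, List.drop_succ_cons, List.getD]
        · rw [if_neg h, if_neg (by simp only [List.length_cons, not_and, not_lt]; push_cast; omega)]
          simp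

-- ===== VERDICT (by name: the statement is the Claim_ definition above) =====
theorem guardar_dado_spec : Claim_equal_guardar_dado := by
  intro r g k _
  unfold Spec_guardar_dado guardar_dado guardar_dado_alt
  rw [gdLoop_spec]
  by_cases h : 0 ≤ k ∧ k < (r.length : Int)
  · rw [if_pos h, if_pos h]
    have h1 : PySem.List.slice r none (some k) = r.take k.toNat :=
      PySem.List.slice_to r h.1
    have h2 : PySem.List.slice r (some (k + 1)) none = r.drop (k + 1).toNat :=
      PySem.List.slice_from r (by omega)
    have h3 : (k + 1).toNat = k.toNat + 1 := by omega
    have h4 : (PySem.List.pyGet? r k).getD 0 = r.getD k.toNat 0 := by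
      rw [PySem.List.pyGet?_of_nonneg r h.1, List.getD_eq_getElem?_getD]
    simp [h1, h2, h3, h4]
  · rw [if_neg h, if_neg h]
    simp
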